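-- pv_equiv track=rewrite | github.com/Hall-Erik/AdventOfCode | 2015/03/main.py | deliver_presents_with_robo
-- ===== SOURCE A (Python) =====
-- def update_position(d: str, position: tuple) -> tuple:
--     if d == '>': return position[0]+1, position[1]
--     elif d == '<': return position[0]-1, position[1]
--     elif d == '^': return position[0], position[1]+1
--     elif d == 'v': return position[0], position[1]-1
--
-- def deliver_presents_with_robo(directions: str) -> int:
--     visited = {(0, 0): None}
--     santa_position = (0, 0)
--     robo_position = (0, 0)
--     for i, d in enumerate(directions):
--         if i % 2 == 0:
--             santa_position = update_position(d, santa_position)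
--             visited[santa_position] = None
--         else:
--             robo_position = update_position(d, robo_position)
--             visited[robo_position] = None
--     return len(visited)
-- ===== SOURCE B (Python) =====
-- def update_position(d: str, position: tuple) -> tuple:
--     if d == '>': return position[0]+1, position[1]
--     elif d == '<': return position[0]-1, position[1]
--     elif d == '^': return position[0], position[1]+1
--     elif d == 'v': return position[0], position[1]-1
--
-- def walk(stream):
--     seen = set()
--     pos = (0, 0)
--     for d in stream:
--         pos = update_position(d, pos)
--         seen.add(pos)
--     return seen
--
-- def deliver_presents_with_robo(directions: str) -> int:
--     return len({(0, 0)} | walk(directions[0::2]) | walk(directions[1::2]))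
-- ===== Notes on version B (the rewrite author's own statement) =====
-- stated objective: alternative
-- what changed: Replaces A's single interleaved pass (one enumerate loop branching on index parity over a shared visited dict and two position variables) by two independent walks over the even- and odd-index slices of the string, each producing its own visited set, united with the start cell and counted.
import Mathlib
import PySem

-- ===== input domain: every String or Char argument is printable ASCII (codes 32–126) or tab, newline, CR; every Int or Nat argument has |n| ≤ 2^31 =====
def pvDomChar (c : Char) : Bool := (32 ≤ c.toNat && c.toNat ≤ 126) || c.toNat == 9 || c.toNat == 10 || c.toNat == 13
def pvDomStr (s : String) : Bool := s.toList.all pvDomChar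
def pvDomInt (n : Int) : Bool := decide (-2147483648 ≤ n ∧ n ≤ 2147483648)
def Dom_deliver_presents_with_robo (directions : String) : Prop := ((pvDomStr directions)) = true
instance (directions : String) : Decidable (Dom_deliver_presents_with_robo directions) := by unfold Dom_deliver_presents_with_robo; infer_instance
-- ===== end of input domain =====

-- B re-decomposes A's single interleaved parity-branching pass as two independent walks over the
-- even- and odd-index slices of the input, united with the start cell (objective: simpler; same cost).

-- ===== PORT A =====
-- shared helper of both Pythons (verbatim in Source A and Source B); `.map` is exact where Python returns:
-- on a direction char with tuple position it moves the tuple, on any other char it returns None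
-- (Python falls off the function). On a direction char with position None Python raises TypeError —
-- those inputs are excluded by Pre_ below — and this port returns none there.
def update_position (d : Char) (position : Option (Int × Int)) : Option (Int × Int) :=
  if d = '>' then position.map (fun p => (p.1 + 1, p.2))
  else if d = '<' then position.map (fun p => (p.1 - 1, p.2))
  else if d = '^' then position.map (fun p => (p.1, p.2 + 1))
  else if d = 'v' then position.map (fun p => (p.1, p.2 - 1))
  else none

-- loop body of A's `for i, d in enumerate(directions)` (state: visited dict, santa, robo)
def pvStepA (st : PySem.Dict (Option (Int × Int)) Unit × Option (Int × Int) × Option (Int × Int))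
    (p : Int × Char) :
    PySem.Dict (Option (Int × Int)) Unit × Option (Int × Int) × Option (Int × Int) :=
  if PySem.Int.mod p.1 2 = 0 then
    let s := update_position p.2 st.2.1
    (st.1.insert s (), s, st.2.2)
  else
    let r := update_position p.2 st.2.2
    (st.1.insert r (), st.2.1, r)

def deliver_presents_with_robo (directions : String) : Int :=
  let res := (PySem.List.enumerate directions.toList).foldl pvStepA
      ((PySem.Dict.empty).insert (some (0, 0)) (), some (0, 0), some (0, 0))
  ((PySem.Dict.size res.1 : Nat) : Int)

-- ===== PORT B =====
-- loop body of B's `for d in stream`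
def pvStepW (st : PySem.Set (Option (Int × Int)) × Option (Int × Int)) (d : Char) :
    PySem.Set (Option (Int × Int)) × Option (Int × Int) :=
  let p := update_position d st.2
  (PySem.Set.add st.1 p, p)

def walk (stream : List Char) : PySem.Set (Option (Int × Int)) :=
  (stream.foldl pvStepW (PySem.Set.empty, some (0, 0))).1

-- directions[0::2] / directions[1::2]: slice? with step 2 is always `some` (step ≠ 0)
def deliver_presents_with_robo_alt (directions : String) : Int :=
  PySem.Set.len
    (PySem.Set.union
      (PySem.Set.union (PySem.Set.ofList [some ((0 : Int), (0 : Int))])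
        (walk ((PySem.List.slice? directions.toList (some 0) none 2).getD [])))
      (walk ((PySem.List.slice? directions.toList (some 1) none 2).getD [])))

-- ===== PRECONDITION & SPEC =====
def pvIsDir (c : Char) : Bool := c = '>' || c = '<' || c = '^' || c = 'v'

def pvEvens {α : Type} : List α → List α
  | [] => []
  | [x] => [x]
  | x :: _ :: t => x :: pvEvens t

def pvOdds {α : Type} (l : List α) : List α := pvEvens l.tail

-- Pre_ excludes exactly the inputs on which A raises TypeError (a direction character occurring
-- after a non-direction character inside one agent's alternating substream); B raises there too.
def Pre_deliver_presents_with_robo (directions : String) : Prop :=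
  (((pvEvens directions.toList).dropWhile pvIsDir).all (fun c => !pvIsDir c)) = true ∧
  (((pvOdds directions.toList).dropWhile pvIsDir).all (fun c => !pvIsDir c)) = true

instance (directions : String) : Decidable (Pre_deliver_presents_with_robo directions) := by
  unfold Pre_deliver_presents_with_robo; infer_instance

def pvWitness_deliver_presents_with_robo : String := ">v<^"

def Spec_deliver_presents_with_robo (directions : String) (out : Int) : Prop :=
  out = deliver_presents_with_robo_alt directions
instance (directions : String) (out : Int) : Decidable (Spec_deliver_presents_with_robo directions out) := by
  unfold Spec_deliver_presents_with_robo; infer_instance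

-- ===== CLAIM (what is proved, stated in full; the proofs are below) =====
def Claim_equal_deliver_presents_with_robo : Prop := ∀ (directions : String), Dom_deliver_presents_with_robo directions → Pre_deliver_presents_with_robo directions → Spec_deliver_presents_with_robo directions (deliver_presents_with_robo directions)

-- ===== LEMMAS AND PROOFS =====

-- the successive positions an agent starting at p visits while consuming ds
def pvPositions (p : Option (Int × Int)) : List Char → List (Option (Int × Int))
  | [] => []
  | d :: ds => update_position d p :: pvPositions (update_position d p) ds

lemma pvEvens_cons {α : Type} (y : α) (t : List α) : pvEvens (y :: t) = y :: pvOdds t := by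
  cases t <;> simp [pvEvens, pvOdds]

lemma pvWalk_fold (l : List Char) (s : PySem.Set (Option (Int × Int))) (p : Option (Int × Int))
    (hs : s.Nodup) :
    (l.foldl pvStepW (s, p)).1.Nodup ∧
    (∀ x, x ∈ (l.foldl pvStepW (s, p)).1 ↔ x ∈ s ∨ x ∈ pvPositions p l) := by
  induction l generalizing s p with
  | nil => exact ⟨hs, by simp [pvPositions]⟩
  | cons d ds ih =>
    have h := ih (PySem.Set.add s (update_position d p)) (update_position d p)
      (PySem.Set.nodup_add s _ hs)
    refine ⟨h.1, fun x => ?_⟩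
    rw [List.foldl_cons]
    show x ∈ (ds.foldl pvStepW (PySem.Set.add s (update_position d p), update_position d p)).1 ↔ _
    rw [h.2 x, PySem.Set.mem_add]
    simp [pvPositions]
    tauto

lemma pvA_fold (l : List Char) : ∀ (n : Int)
    (v : PySem.Dict (Option (Int × Int)) Unit) (s r : Option (Int × Int)),
    v.keys.Nodup → PySem.Int.mod n 2 = 0 →
    ((PySem.List.enumerate l n).foldl pvStepA (v, s, r)).1.keys.Nodup ∧
    (∀ x, x ∈ ((PySem.List.enumerate l n).foldl pvStepA (v, s, r)).1.keys ↔
      x ∈ v.keys ∨ x ∈ pvPositions s (pvEvens l) ∨ x ∈ pvPositions r (pvOdds l)) := by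
  induction l using pvEvens.induct with
  | case1 =>
    intro n v s r hv hn
    simp [PySem.List.enumerate, pvEvens, pvOdds, pvPositions, hv]
  | case2 x =>
    intro n v s r hv hn
    have e1 : pvStepA (v, s, r) (n, x) =
        (v.insert (update_position x s) (), update_position x s, r) := by
      simp only [pvStepA]
      rw [if_pos hn]
    rw [PySem.List.enumerate_cons, PySem.List.enumerate_nil, List.foldl_cons, List.foldl_nil, e1]
    refine ⟨PySem.Dict.nodup_keys_insert _ _ _ hv, fun z => ?_⟩
    rw [PySem.Dict.mem_keys_insert]
    simp only [pvEvens, pvOdds, pvPositions, List.tail_cons]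
    simp
    tauto
  | case3 x y t ih =>
    intro n v s r hv hn
    have hn1 : ¬ PySem.Int.mod (n + 1) 2 = 0 := by
      rw [PySem.Int.mod_eq_emod_of_pos (by omega : (0:Int) < 2)] at hn ⊢
      omega
    have hn2 : PySem.Int.mod (n + 1 + 1) 2 = 0 := by
      rw [PySem.Int.mod_eq_emod_of_pos (by omega : (0:Int) < 2)] at hn ⊢
      omega
    have e1 : pvStepA (v, s, r) (n, x) =
        (v.insert (update_position x s) (), update_position x s, r) := by
      simp only [pvStepA]
      rw [if_pos hn]
    have e2 : pvStepA (v.insert (update_position x s) (), update_position x s, r) (n + 1, y) =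
        ((v.insert (update_position x s) ()).insert (update_position y r) (),
          update_position x s, update_position y r) := by
      simp only [pvStepA]
      rw [if_neg hn1]
    rw [PySem.List.enumerate_cons, PySem.List.enumerate_cons, List.foldl_cons, List.foldl_cons,
      e1, e2]
    have h := ih (n + 1 + 1)
      (((v.insert (update_position x s) ()).insert (update_position y r) ()))
      (update_position x s) (update_position y r)
      (PySem.Dict.nodup_keys_insert _ _ _ (PySem.Dict.nodup_keys_insert _ _ _ hv)) hn2
    refine ⟨h.1, fun z => ?_⟩
    rw [h.2 z, PySem.Dict.mem_keys_insert, PySem.Dict.mem_keys_insert]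
    have he : pvEvens (x :: y :: t) = x :: pvEvens t := rfl
    have ho : pvOdds (x :: y :: t) = y :: pvOdds t := by
      show pvEvens (y :: t) = _
      exact pvEvens_cons y t
    rw [he, ho]
    simp only [pvPositions, List.mem_cons]
    tauto

-- slice? with step 2 picks the even-index elements
lemma pvFilterMap_evens {α : Type} (xs : List α) :
    List.filterMap (fun (k : Nat) => xs[(0 + 2 * (k : Int)).toNat]?) (List.range ((xs.length + 1) / 2)) =
      pvEvens xs := by
  induction xs using pvEvens.induct with
  | case1 => simp [pvEvens]
  | case2 x => simp [pvEvens, List.range_succ]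
  | case3 x y t ih =>
    have h2 : ((x :: y :: t).length + 1) / 2 = (t.length + 1) / 2 + 1 := by
      simp only [List.length_cons]
      omega
    rw [h2, List.range_succ_eq_map, List.filterMap_cons, List.filterMap_map]
    have hget : ∀ k ∈ List.range ((t.length + 1) / 2),
        ((fun (k : Nat) => (x :: y :: t)[(0 + 2 * (k : Int)).toNat]?) ∘ Nat.succ) k =
        (fun (k : Nat) => t[(0 + 2 * (k : Int)).toNat]?) k := by
      intro k _
      simp only [Function.comp, Nat.succ_eq_add_one]
      have hidx : (0 + 2 * ((k + 1 : Nat) : Int)).toNat = (0 + 2 * (k : Int)).toNat + 2 := by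
        push_cast
        omega
      rw [hidx]
      simp
    rw [List.filterMap_congr hget, ih]
    norm_num [pvEvens]

lemma pvSlice_evens {α : Type} (xs : List α) :
    PySem.List.slice? xs (some 0) none 2 = some (pvEvens xs) := by
  rw [PySem.List.slice?]
  simp only [if_neg (by norm_num : ¬ (2 : Int) = 0)]
  have hsi : PySem.List.sliceIndices xs.length (some 0) none 2 = (0, (xs.length : Int), 2) := by
    simp [PySem.List.sliceIndices]
  rw [hsi]
  simp only
  have hcount : (if (0 : Int) < 2 then if (0 : Int) < (xs.length : Int) then
      (((xs.length : Int) - 0 + 2 - 1) / 2).toNat else 0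
      else if (xs.length : Int) < 0 then (((0 : Int) - xs.length + -2 - 1) / -2).toNat else 0) =
      (xs.length + 1) / 2 := by
    split_ifs <;> omega
  rw [hcount]
  exact congrArg some (pvFilterMap_evens xs)

lemma pvSlice_odds {α : Type} (xs : List α) :
    PySem.List.slice? xs (some 1) none 2 = some (pvOdds xs) := by
  cases xs with
  | nil => simp [PySem.List.slice?, PySem.List.sliceIndices, pvOdds, pvEvens]
  | cons x t =>
    rw [PySem.List.slice?]
    simp only [if_neg (by norm_num : ¬ (2 : Int) = 0)]
    have hsi : PySem.List.sliceIndices (x :: t).length (some 1) none 2 =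
        (1, ((x :: t).length : Int), 2) := by
      simp [PySem.List.sliceIndices]
    rw [hsi]
    simp only
    have hcount : (if (0 : Int) < 2 then if (1 : Int) < ((x :: t).length : Int) then
        ((((x :: t).length : Int) - 1 + 2 - 1) / 2).toNat else 0
        else if ((x :: t).length : Int) < 1 then
          (((1 : Int) - (x :: t).length + -2 - 1) / -2).toNat else 0) =
        (t.length + 1) / 2 := by
      simp only [List.length_cons]
      split_ifs <;> omega
    rw [hcount]
    have hget : ∀ k ∈ List.range ((t.length + 1) / 2),
        (fun (k : Nat) => (x :: t)[(1 + 2 * (k : Int)).toNat]?) k =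
        (fun (k : Nat) => t[(0 + 2 * (k : Int)).toNat]?) k := by
      intro k _
      simp only
      have hidx : (1 + 2 * (k : Int)).toNat = (0 + 2 * (k : Int)).toNat + 1 := by
        omega
      rw [hidx]
      simp
    rw [List.filterMap_congr hget]
    exact congrArg some (pvFilterMap_evens t)

lemma pvKeys_length_eq_size {κ ν : Type} [BEq κ] (d : PySem.Dict κ ν) :
    d.keys.length = PySem.Dict.size d := by
  simp [PySem.Dict.keys, PySem.Dict.size]

-- ===== VERDICT (by name: the statement is the Claim_ definition above) =====
theorem deliver_presents_with_robo_spec : Claim_equal_deliver_presents_with_robo := by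
  intro directions _ _
  unfold Spec_deliver_presents_with_robo deliver_presents_with_robo deliver_presents_with_robo_alt
  rw [pvSlice_evens, pvSlice_odds]
  simp only [Option.getD_some]
  set L := directions.toList with hL
  have hA := pvA_fold L 0 ((PySem.Dict.empty).insert (some (0, 0)) ())
    (some (0, 0)) (some (0, 0)) (by decide) (by decide)
  have hW1 := pvWalk_fold (pvEvens L) PySem.Set.empty (some (0, 0)) (by decide)
  have hW2 := pvWalk_fold (pvOdds L) PySem.Set.empty (some (0, 0)) (by decide)
  set K := ((PySem.List.enumerate L).foldl pvStepA
    ((PySem.Dict.empty).insert (some (0, 0)) (), some (0, 0), some (0, 0))).1.keys with hK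
  set S := PySem.Set.union
    (PySem.Set.union (PySem.Set.ofList [some ((0 : Int), (0 : Int))]) (walk (pvEvens L)))
    (walk (pvOdds L)) with hS
  have hSnodup : S.Nodup := by
    apply PySem.Set.nodup_union
    apply PySem.Set.nodup_union
    exact PySem.Set.nodup_ofList _
  have hkeys0 : (PySem.Dict.empty.insert (some ((0 : Int), (0 : Int))) ()).keys =
      [some (0, 0)] := by decide
  have hmem : ∀ x, x ∈ K ↔ x ∈ S := by
    intro x
    rw [hA.2 x, hkeys0]
    rw [hS, PySem.Set.mem_union, PySem.Set.mem_union, PySem.Set.mem_ofList]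
    unfold walk
    rw [hW1.2 x, hW2.2 x]
    simp only [PySem.Set.empty, List.not_mem_nil, false_or, List.mem_singleton]
    tauto
  have hperm : K.Perm S := (List.perm_ext_iff_of_nodup hA.1 hSnodup).mpr hmem
  have hlen : K.length = S.length := hperm.length_eq
  rw [PySem.Set.len, ← hlen, pvKeys_length_eq_size]
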